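-- pv_equiv track=rewrite | github.com/Vastio/Python | syncMedia.py | getSeason
-- ===== SOURCE A (Python) =====
-- def getSeason(str_name):
--
--     sep_list = ('x', 'X', 'e', 'E')
--
--     season = 'Season '
--     num = ''
--
--     for char in str_name:
--         if char.isdigit():
--             num += char
--         if char in sep_list:
--             break
--
--     return season + num
-- ===== SOURCE B (Python) =====
-- def getSeason(str_name):
--     # Successively truncate the string at each separator via str.partition,
--     # then keep the digits of what survives. Truncating at the first
--     # occurrence of each separator in turn leaves exactly the prefix before
--     # the earliest separator, so this matches A.
--     s = str_name
--     for sep in ('x', 'X', 'e', 'E'):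
--         s = s.partition(sep)[0]
--     return 'Season ' + ''.join(filter(str.isdigit, s))
-- ===== Notes on version B (the rewrite author's own statement) =====
-- stated objective: alternative
-- what changed: Instead of A's fused character scan that accumulates digits and breaks at a separator, B never scans for a boundary itself: it folds str.partition over the four separators, truncating the string at each one's first occurrence in turn, and then filters digits from the surviving prefix.
import Mathlib
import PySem

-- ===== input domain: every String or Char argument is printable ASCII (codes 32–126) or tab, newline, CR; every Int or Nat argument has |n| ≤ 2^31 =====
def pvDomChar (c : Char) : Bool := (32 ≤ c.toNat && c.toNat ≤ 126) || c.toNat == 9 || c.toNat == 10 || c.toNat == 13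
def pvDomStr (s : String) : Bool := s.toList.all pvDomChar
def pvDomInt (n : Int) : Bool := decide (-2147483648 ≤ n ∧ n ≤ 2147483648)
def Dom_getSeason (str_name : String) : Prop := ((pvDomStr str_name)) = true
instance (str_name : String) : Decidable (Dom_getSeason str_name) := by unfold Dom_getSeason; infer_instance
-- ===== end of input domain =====

-- B replaces A's fused digit-accumulate/break scan by folding str.partition truncation over the four separators, then filtering digits; objective: alternative.


-- ===== PORT A =====
-- A's loop: append digit, then break on separator; accumulator holds the collected digit chars.
def getSeasonLoopA : List Char → List Char → List Char
  | [], num => num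
  | c :: rest, num =>
    let num' := if PySem.Chars.isdigit c then num ++ [c] else num
    if c ∈ ['x', 'X', 'e', 'E'] then num' else getSeasonLoopA rest num'

def getSeason (str_name : String) : String :=
  String.mk ("Season ".toList ++ getSeasonLoopA str_name.toList [])

-- ===== PORT B =====
-- s.partition(sep)[0]: the part of s strictly before the first occurrence of sep (all of s if absent).
def cutAt (s : List Char) (sep : Char) : List Char := s.takeWhile (· ≠ sep)

def getSeason_alt (str_name : String) : String :=
  let s := ['x', 'X', 'e', 'E'].foldl cutAt str_name.toList
  String.mk ("Season ".toList ++ s.filter PySem.Chars.isdigit)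

-- ===== PRECONDITION & SPEC =====
def Spec_getSeason (str_name : String) (out : String) : Prop := out = getSeason_alt str_name
instance (str_name : String) (out : String) : Decidable (Spec_getSeason str_name out) := by unfold Spec_getSeason; infer_instance

-- ===== CLAIM =====
def Claim_equal_getSeason : Prop := ∀ (str_name : String), Dom_getSeason str_name → Spec_getSeason str_name (getSeason str_name)

-- ===== LEMMAS AND PROOFS =====
-- Folding the four truncations = one takeWhile with the combined "not a separator" predicate.
theorem foldl_cutAt_eq (cs : List Char) :
    ['x', 'X', 'e', 'E'].foldl cutAt cs
      = cs.takeWhile (fun c => !(c ∈ ['x', 'X', 'e', 'E'] : Bool)) := by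
  simp only [List.foldl, cutAt, List.takeWhile_takeWhile]
  congr 1
  funext c
  by_cases hx : c = 'x' <;> by_cases hX : c = 'X' <;> by_cases he : c = 'e' <;> by_cases hE : c = 'E' <;>
    simp [hx, hX, he, hE]

-- A's fused loop computes the digit-filter of that same prefix.
theorem getSeasonLoopA_eq (cs : List Char) (acc : List Char) :
    getSeasonLoopA cs acc
      = acc ++ (cs.takeWhile (fun c => !(c ∈ ['x', 'X', 'e', 'E'] : Bool))).filter PySem.Chars.isdigit := by
  induction cs generalizing acc with
  | nil => simp [getSeasonLoopA]
  | cons c rest ih =>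
    by_cases hsep : c ∈ ['x', 'X', 'e', 'E']
    · have hnd : PySem.Chars.isdigit c = false := by
        fin_cases hsep <;> decide
      simp [getSeasonLoopA, hsep, hnd, List.takeWhile]
    · have hnd : (!decide (c ∈ ['x', 'X', 'e', 'E'])) = true := by simp [hsep]
      simp only [getSeasonLoopA, if_neg hsep, ih, List.takeWhile, hnd]
      by_cases hd : PySem.Chars.isdigit c = true <;> simp [hd]

-- ===== VERDICT =====
theorem getSeason_spec : Claim_equal_getSeason := by
  intro s _
  unfold Spec_getSeason getSeason getSeason_alt
  rw [getSeasonLoopA_eq, foldl_cutAt_eq]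
  simp
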